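-- pv_equiv track=rewrite | github.com/teslavargas/reporte-api | app/parsers.py | parse_series_tv
-- ===== SOURCE A (Python) =====
-- def parse_series_tv(text: str) -> list:
--     lines = [l.strip() for l in text.splitlines() if l.strip()]
--     if lines and lines[0].lower().startswith("series de tv"):
--         lines = lines[1:]
--     entries = []
--     i = 0
--     while i < len(lines):
--         entry = {}
--         if i < len(lines):
--             entry["titulo"] = lines[i]
--             i += 1
--         if i < len(lines):
--             entry["años"] = lines[i]
--             i += 1
--         desc_lines = []
--         while i < len(lines) and "Mencionado en el tiempo" not in lines[i]:
--             desc_lines.append(lines[i])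
--             i += 1
--         entry["descripcion"] = " ".join(desc_lines)
--         if i < len(lines) and "Mencionado en el tiempo" in lines[i]:
--             i += 1
--             if i < len(lines):
--                 entry["tiempo"] = lines[i]
--                 i += 1
--         entries.append(entry)
--     return entries
-- ===== SOURCE B (Python) =====
-- def parse_series_tv(text: str) -> list:
--     lines = [l.strip() for l in text.splitlines() if l.strip()]
--     if lines and lines[0].lower().startswith("series de tv"):
--         lines = lines[1:]
--     entries = []
--     phase = "titulo"
--     entry = {}
--     buf = []
--     for line in lines:
--         if phase == "titulo":
--             entry = {"titulo": line}
--             phase = "años"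
--         elif phase == "años":
--             entry["años"] = line
--             buf = []
--             phase = "descripcion"
--         elif phase == "descripcion":
--             if "Mencionado en el tiempo" in line:
--                 entry["descripcion"] = " ".join(buf)
--                 phase = "tiempo"
--             else:
--                 buf.append(line)
--         else:  # tiempo
--             entry["tiempo"] = line
--             entries.append(entry)
--             phase = "titulo"
--     if phase == "años":
--         entry["descripcion"] = ""
--         entries.append(entry)
--     elif phase == "descripcion":
--         entry["descripcion"] = " ".join(buf)
--         entries.append(entry)
--     elif phase == "tiempo":
--         entries.append(entry)
--     return entries
-- ===== Notes on version B (the rewrite author's own statement) =====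
-- stated objective: alternative
-- what changed: Replaces A's index-driven outer while loop with a nested marker-scanning while loop by a single foldl over the cleaned lines driven by a four-phase state machine (titulo/años/descripcion/tiempo) with an end-of-input flush that emits any partially built entry.
import Mathlib
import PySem

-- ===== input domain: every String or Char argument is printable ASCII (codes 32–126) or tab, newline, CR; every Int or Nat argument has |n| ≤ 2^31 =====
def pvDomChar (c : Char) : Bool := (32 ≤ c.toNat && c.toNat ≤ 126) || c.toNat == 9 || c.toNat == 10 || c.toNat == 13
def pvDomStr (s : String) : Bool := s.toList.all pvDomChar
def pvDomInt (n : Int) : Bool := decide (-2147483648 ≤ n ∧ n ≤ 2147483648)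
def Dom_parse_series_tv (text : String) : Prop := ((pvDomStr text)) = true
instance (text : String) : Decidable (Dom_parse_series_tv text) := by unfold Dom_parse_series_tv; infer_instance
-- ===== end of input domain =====

-- B replaces A's index-driven while loop (with its inner marker-scanning while) by a single
-- foldl over the lines driven by a 4-phase state machine plus an end-of-input flush (objective: alternative).

-- shared preprocessing (identical lines of Python in A and B):
-- lines = [l.strip() for l in text.splitlines() if l.strip()]; header skip
def pvLines (text : String) : List String :=
  ((PySem.Str.splitlines text).map PySem.Str.strip).filter (fun l => l != "")

def pvSkip (lines : List String) : List String :=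
  match lines with
  | [] => lines
  | x :: rest =>
      if PySem.Str.startswith (PySem.Str.lower x) "series de tv" then rest else lines

def pvMarker : String := "Mencionado en el tiempo"

-- ===== PORT A =====
-- the inner 'while … not in lines[i]' scan: (desc_lines, remaining lines)
def pvSplitDesc : List String → List String × List String
  | [] => ([], [])
  | x :: xs =>
      if PySem.Str.isIn pvMarker x then ([], x :: xs)
      else
        let p := pvSplitDesc xs
        (x :: p.1, p.2)

theorem pvSplitDesc_snd_le (xs : List String) : (pvSplitDesc xs).2.length ≤ xs.length := by
  induction xs with
  | nil => simp [pvSplitDesc]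
  | cons x xs ih =>
      simp only [pvSplitDesc]
      split <;> simp <;> omega

-- A's outer while loop; entry is a dict whose keys are all fresh, so each
-- entry[k] = v appends (k, v) to the association list.
def pvALoop : List String → List (List (String × String))
  | [] => []
  | [t] => [[("titulo", t), ("descripcion", "")]]
  | t :: y :: rest2 =>
      let p := pvSplitDesc rest2
      let e3 := [("titulo", t), ("años", y), ("descripcion", PySem.Str.join " " p.1)]
      match hr : p.2 with
      | [] => [e3]
      | [_m] => [e3]
      | _m :: tm :: rem3 => (e3 ++ [("tiempo", tm)]) :: pvALoop rem3
termination_by l => l.length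
decreasing_by
  have h := pvSplitDesc_snd_le rest2
  rw [hr] at h
  simp at h ⊢
  omega

def parse_series_tv (text : String) : List (List (String × String)) :=
  pvALoop (pvSkip (pvLines text))

-- ===== PORT B =====
-- state = (phase, entry, buf, entries); phase: 0 = titulo, 1 = años, 2 = descripcion, 3 = tiempo
def pvStep (s : Nat × List (String × String) × List String × List (List (String × String)))
    (line : String) : Nat × List (String × String) × List String × List (List (String × String)) :=
  let (p, e, b, acc) := s
  if p = 0 then (1, [("titulo", line)], b, acc)
  else if p = 1 then (2, e ++ [("años", line)], [], acc)
  else if p = 2 then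
    if PySem.Str.isIn pvMarker line then
      (3, e ++ [("descripcion", PySem.Str.join " " b)], b, acc)
    else (2, e, b ++ [line], acc)
  else
    let e' := e ++ [("tiempo", line)]
    (0, e', b, acc ++ [e'])

def pvFlush (s : Nat × List (String × String) × List String × List (List (String × String))) :
    List (List (String × String)) :=
  let (p, e, b, acc) := s
  if p = 1 then acc ++ [e ++ [("descripcion", "")]]
  else if p = 2 then acc ++ [e ++ [("descripcion", PySem.Str.join " " b)]]
  else if p = 3 then acc ++ [e]
  else acc

def parse_series_tv_alt (text : String) : List (List (String × String)) :=
  pvFlush ((pvSkip (pvLines text)).foldl pvStep (0, [], [], []))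

-- ===== PRECONDITION & SPEC =====
def Spec_parse_series_tv (text : String) (out : List (List (String × String))) : Prop := out = parse_series_tv_alt text
instance (text : String) (out : List (List (String × String))) : Decidable (Spec_parse_series_tv text out) := by unfold Spec_parse_series_tv; infer_instance

-- ===== CLAIM (what is proved, stated in full; the proofs are below) =====
def Claim_equal_parse_series_tv : Prop := ∀ (text : String), Dom_parse_series_tv text → Spec_parse_series_tv text (parse_series_tv text)

-- ===== LEMMAS AND PROOFS =====

-- what A produces once the title and years of the current entry are fixed and the
-- description scan is about to run over ls, with buffered description lines b
def pvTail (e : List (String × String)) (b : List String) (ls : List String) :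
    List (List (String × String)) :=
  match (pvSplitDesc ls).2 with
  | [] => [e ++ [("descripcion", PySem.Str.join " " (b ++ (pvSplitDesc ls).1))]]
  | [_m] => [e ++ [("descripcion", PySem.Str.join " " (b ++ (pvSplitDesc ls).1))]]
  | _m :: tm :: rem3 =>
      (e ++ [("descripcion", PySem.Str.join " " (b ++ (pvSplitDesc ls).1)), ("tiempo", tm)]) ::
        pvALoop rem3

theorem pvStep0 {e : List (String × String)} {b : List String}
    {acc : List (List (String × String))} {line : String} :
    pvStep (0, e, b, acc) line = (1, [("titulo", line)], b, acc) := rfl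

theorem pvStep1 {e : List (String × String)} {b : List String}
    {acc : List (List (String × String))} {line : String} :
    pvStep (1, e, b, acc) line = (2, e ++ [("años", line)], [], acc) := rfl

theorem pvStep2t {e : List (String × String)} {b : List String}
    {acc : List (List (String × String))} {line : String}
    (hm : PySem.Chars.isIn pvMarker.toList line.toList = true) :
    pvStep (2, e, b, acc) line =
      (3, e ++ [("descripcion", PySem.Str.join " " b)], b, acc) := by
  simp [pvStep, hm]

theorem pvStep2f {e : List (String × String)} {b : List String}
    {acc : List (List (String × String))} {line : String}
    (hm : PySem.Chars.isIn pvMarker.toList line.toList = false) :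
    pvStep (2, e, b, acc) line = (2, e, b ++ [line], acc) := by
  simp [pvStep, hm]

theorem pvStep3 {e : List (String × String)} {b : List String}
    {acc : List (List (String × String))} {line : String} :
    pvStep (3, e, b, acc) line =
      (0, e ++ [("tiempo", line)], b, acc ++ [e ++ [("tiempo", line)]]) := rfl

theorem pvSplit_t {x : String} {xs : List String}
    (hm : PySem.Chars.isIn pvMarker.toList x.toList = true) :
    pvSplitDesc (x :: xs) = ([], x :: xs) := by
  simp [pvSplitDesc, hm]

theorem pvSplit_f {x : String} {xs : List String}
    (hm : PySem.Chars.isIn pvMarker.toList x.toList = false) :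
    pvSplitDesc (x :: xs) = ((pvSplitDesc xs).1.cons x, (pvSplitDesc xs).2) := by
  simp [pvSplitDesc, hm]

theorem pvTail_t_nil {x : String} {e : List (String × String)} {b : List String}
    (hm : PySem.Chars.isIn pvMarker.toList x.toList = true) :
    pvTail e b [x] = [e ++ [("descripcion", PySem.Str.join " " b)]] := by
  simp [pvTail, pvSplit_t hm]

theorem pvTail_t_cons {x tm : String} {rem3 : List String}
    {e : List (String × String)} {b : List String}
    (hm : PySem.Chars.isIn pvMarker.toList x.toList = true) :
    pvTail e b (x :: tm :: rem3) =
      (e ++ [("descripcion", PySem.Str.join " " b), ("tiempo", tm)]) :: pvALoop rem3 := by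
  simp [pvTail, pvSplit_t hm]

theorem pvTail_f {x : String} {xs : List String} {e : List (String × String)} {b : List String}
    (hm : PySem.Chars.isIn pvMarker.toList x.toList = false) :
    pvTail e b (x :: xs) = pvTail e (b ++ [x]) xs := by
  rcases hs2 : (pvSplitDesc xs).2 with _ | ⟨m, _ | ⟨tm, rem3⟩⟩ <;>
    simp [pvTail, pvSplit_f hm, hs2]

theorem pvALoop_cons_cons (t y : String) (rest2 : List String) :
    pvALoop (t :: y :: rest2) = pvTail [("titulo", t), ("años", y)] [] rest2 := by
  rw [pvALoop.eq_def]
  split <;> simp_all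
  split <;> simp_all [pvTail]

theorem pvMain (n : Nat) :
    (∀ ls : List String, ls.length ≤ n → ∀ e b acc,
        pvFlush (ls.foldl pvStep (2, e, b, acc)) = acc ++ pvTail e b ls) ∧
    (∀ ls : List String, ls.length ≤ n → ∀ e b acc,
        pvFlush (ls.foldl pvStep (0, e, b, acc)) = acc ++ pvALoop ls) := by
  induction n with
  | zero =>
      constructor <;>
        · intro ls hls e b acc
          have h0 : ls = [] := List.eq_nil_of_length_eq_zero (Nat.le_zero.mp hls)
          subst h0
          simp [pvFlush, pvTail, pvSplitDesc, pvALoop]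
  | succ n ih =>
      obtain ⟨ih2, ih0⟩ := ih
      refine ⟨?_, ?_⟩
      · intro ls hls e b acc
        match ls with
        | [] => simp [pvFlush, pvTail, pvSplitDesc]
        | x :: xs =>
            rw [List.foldl_cons]
            by_cases hm : PySem.Chars.isIn pvMarker.toList x.toList = true
            · rw [pvStep2t hm]
              match xs with
              | [] =>
                  rw [List.foldl_nil, pvTail_t_nil hm]
                  simp [pvFlush]
              | tm :: rem3 =>
                  rw [List.foldl_cons, pvStep3, ih0 rem3 (by simp at hls; omega),
                    pvTail_t_cons hm]
                  simp
            · simp only [Bool.not_eq_true] at hm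
              rw [pvStep2f hm, ih2 xs (by simp at hls; omega), pvTail_f hm]
      · intro ls hls e b acc
        match ls with
        | [] => simp [pvFlush, pvALoop]
        | [t] =>
            rw [List.foldl_cons, pvStep0, List.foldl_nil]
            simp [pvFlush, pvALoop]
        | t :: y :: rest2 =>
            rw [List.foldl_cons, pvStep0, List.foldl_cons, pvStep1,
              ih2 rest2 (by simp at hls; omega), pvALoop_cons_cons]
            simp

-- ===== VERDICT (by name: the statement is the Claim_ definition above) =====
theorem parse_series_tv_spec : Claim_equal_parse_series_tv := by
  intro text _
  unfold Spec_parse_series_tv parse_series_tv parse_series_tv_alt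
  rw [(pvMain (pvSkip (pvLines text)).length).2 _ le_rfl]
  simp
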